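-- pv_equiv track=rewrite | github.com/wan-catherine/Leetcode | problems/N1432_Max_Difference_You_Can_Get_From_Changing_An_Integer.py | maxDiff_20250615
-- ===== SOURCE A (Python) =====
-- def maxDiff_20250615(num: int) -> int:
--     snum = str(num)
--     length = len(snum)
--     xarr, yarr = [snum[0]], [snum[0]]
--     for i in range(1, length):
--         if snum[i] not in xarr:
--             xarr.append(snum[i])
--     for i in range(1, length):
--         if snum[i] not in yarr:
--             yarr.append(snum[i])
--     if len(xarr) == 1:
--         return int('8' * length)
--     x = '9'
--     for c in xarr:
--         if x != c:
--             x = c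
--             break
--     if yarr[0] != '1':
--         y = yarr[0]
--         ry = '1'
--     else:
--         i = 1
--         while i < len(yarr) and yarr[i] == '0':
--             i += 1
--         if i == len(yarr):
--             y = yarr[1]
--             ry = '0'
--         else:
--             y = yarr[i]
--             ry = '0'
--     a, b = [], []
--     for i in range(length):
--         if snum[i] == x:
--             a.append('9')
--         else:
--             a.append(snum[i])
--     for i in range(length):
--         if snum[i] == y:
--             b.append(ry)
--         else:
--             b.append(snum[i])
--     return int(''.join(a)) - int(''.join(b))
-- ===== SOURCE B (Python) =====
-- DIGITS = "0123456789"
--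
--
-- def _subst(s, c, d):
--     return "".join(d if x == c else x for x in s)
--
--
-- def maxDiff_20250615(num: int) -> int:
--     # Brute force: enumerate every "replace all occurrences of one character by one
--     # digit" rewrite of str(num), keep those that are valid digit strings without a
--     # leading zero, and take the spread between the largest and smallest candidate.
--     # All candidates have the same length, so string order is numeric order.
--     s = str(num)
--     cands = [t for c in s for d in DIGITS
--              for t in [_subst(s, c, d)]
--              if t.isdigit() and t[0] != "0"]
--     return int(max(cands)) - int(min(cands))
-- ===== Notes on version B (the rewrite author's own statement) =====
-- stated objective: alternative
-- what changed: B replaces A's greedy digit selection (distinct-digit lists, an all-same-digit special case, chosen replacement digits and index rebuild loops) by exhaustive search: it enumerates all (character, digit) replacement rewrites of str(num), filters the valid no-leading-zero digit strings, and returns max minus min of the candidate set.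
import Mathlib
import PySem

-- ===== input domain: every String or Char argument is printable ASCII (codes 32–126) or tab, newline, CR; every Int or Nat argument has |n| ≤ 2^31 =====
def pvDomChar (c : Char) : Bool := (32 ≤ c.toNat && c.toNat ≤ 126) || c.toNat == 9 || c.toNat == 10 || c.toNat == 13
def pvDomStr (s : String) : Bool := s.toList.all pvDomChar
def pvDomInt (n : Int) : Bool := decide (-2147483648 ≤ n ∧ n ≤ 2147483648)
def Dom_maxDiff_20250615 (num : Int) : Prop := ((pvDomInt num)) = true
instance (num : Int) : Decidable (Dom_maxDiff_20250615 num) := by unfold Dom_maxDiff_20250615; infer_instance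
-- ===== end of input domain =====

-- B replaces A's greedy digit selection (distinct-digit lists, all-same-digit special case,
-- chosen replacement digits, index rebuild loops) by exhaustive search over all
-- (character, digit) replacement rewrites of str(num), taking max minus min of the valid
-- candidates (objective: alternative).

-- ===== PORT A =====
-- 'if snum[i] not in arr: arr.append(snum[i])' — one step of A's distinct-character accumulation
def pvStep (acc : List Char) (c : Char) : List Char := if c ∈ acc then acc else acc ++ [c]
-- "x = '9'; for c in xarr: if x != c: x = c; break"  (x is still '9' at every compare)
def pvPickX : List Char → Char
  | [] => '9'
  | c :: rest => if '9' ≠ c then c else pvPickX rest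
-- "i = 1; while i < len(yarr) and yarr[i] == '0': i += 1"
def pvWhile0 (ys : List Char) (i : Nat) : Nat :=
  if h : i < ys.length then (if ys[i] = '0' then pvWhile0 ys (i + 1) else i) else i
  termination_by ys.length - i
-- A's body after 'snum = str(num)', working on the character list of str(num)
def pvA_core (snum : List Char) : Int :=
  let length : Int := snum.length
  let xarr := (PySem.List.pyRange 1 length 1).foldl
      (fun acc i => pvStep acc (PySem.List.pyGetD snum i ' ')) [PySem.List.pyGetD snum 0 ' ']
  let yarr := (PySem.List.pyRange 1 length 1).foldl
      (fun acc i => pvStep acc (PySem.List.pyGetD snum i ' ')) [PySem.List.pyGetD snum 0 ' ']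
  if xarr.length = 1 then (PySem.Int.ofChars? (List.replicate length.toNat '8')).getD 0
  else
    let x := pvPickX xarr
    let yr : Char × Char :=
      if PySem.List.pyGetD yarr 0 ' ' ≠ '1' then (PySem.List.pyGetD yarr 0 ' ', '1')
      else
        let i := pvWhile0 yarr 1
        if i = yarr.length then (PySem.List.pyGetD yarr 1 ' ', '0')  -- yarr[1]; the getD default is unreachable here
        else (PySem.List.pyGetD yarr (i : Int) ' ', '0')
    let a := (PySem.List.pyRange 0 length 1).foldl
      (fun acc i => acc ++ [if PySem.List.pyGetD snum i ' ' = x then '9' else PySem.List.pyGetD snum i ' ']) []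
    let b := (PySem.List.pyRange 0 length 1).foldl
      (fun acc i => acc ++ [if PySem.List.pyGetD snum i ' ' = yr.1 then yr.2 else PySem.List.pyGetD snum i ' ']) []
    (PySem.Int.ofChars? a).getD 0 - (PySem.Int.ofChars? b).getD 0
def maxDiff_20250615 (num : Int) : Int := pvA_core (PySem.Int.toChars num)

-- ===== PORT B =====
-- DIGITS = "0123456789"
def pvDigitsList : List Char := ['0', '1', '2', '3', '4', '5', '6', '7', '8', '9']
-- _subst(s, c, d) = "".join(d if x == c else x for x in s)
def pvSubst (s : List Char) (c d : Char) : List Char := s.map (fun x => if x = c then d else x)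
-- t.isdigit() and t[0] != "0"
def pvCandTest (t : List Char) : Bool :=
  PySem.Chars.strIsdigit t && !(PySem.List.pyGetD t 0 ' ' == '0')
-- the candidate comprehension: every rewrite of s that is a digit string without leading zero
def pvCands (s : List Char) : List (List Char) :=
  s.flatMap (fun c => pvDigitsList.flatMap (fun d =>
    [pvSubst s c d].flatMap (fun t => if pvCandTest t then [t] else [])))
-- int(max(cands)) - int(min(cands)) — string order; all candidates have the same length
def maxDiff_20250615_alt (num : Int) : Int :=
  let s := PySem.Int.toChars num
  let cands := pvCands s
  (PySem.Int.ofChars? ((PySem.List.max? cands (fun t => t)).getD [])).getD 0 -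
    (PySem.Int.ofChars? ((PySem.List.min? cands (fun t => t)).getD [])).getD 0

-- ===== PRECONDITION & SPEC =====
def Spec_maxDiff_20250615 (num : Int) (out : Int) : Prop := out = maxDiff_20250615_alt num
instance (num : Int) (out : Int) : Decidable (Spec_maxDiff_20250615 num out) := by unfold Spec_maxDiff_20250615; infer_instance

-- ===== CLAIM (what is proved, stated in full; the proofs are below) =====
def Claim_equal_maxDiff_20250615 : Prop := ∀ (num : Int), Dom_maxDiff_20250615 num → Spec_maxDiff_20250615 num (maxDiff_20250615 num)

-- ===== LEMMAS AND PROOFS =====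

-- A's result characterised: replace the first char ≠ '9' by '9', and the leading char by '1'
-- (or, after a leading '1', the first char outside {'0','1'} by '0')
def pvGreedy (s : List Char) : Int :=
  let hi := match s.find? (fun ch => ch ≠ '9') with
    | some c => s.map (fun ch => if ch = c then '9' else ch)
    | none => s
  let lo :=
    if PySem.List.pyGetD s 0 ' ' ≠ '1' then
      s.map (fun ch => if ch = PySem.List.pyGetD s 0 ' ' then '1' else ch)
    else
      match (PySem.List.slice s (some 1) none).find? (fun ch => !(ch == '0' || ch == '1')) with
      | some d => s.map (fun ch => if ch = d then '0' else ch)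
      | none => s
  (PySem.Int.ofChars? hi).getD 0 - (PySem.Int.ofChars? lo).getD 0

theorem pvFold_extend (t : List Char) : ∀ acc : List Char,
    ∃ u, t.foldl pvStep acc = acc ++ u ∧ ∀ x ∈ u, x ∉ acc := by
  induction t with
  | nil => intro acc; exact ⟨[], by simp⟩
  | cons c t ih =>
    intro acc
    simp only [List.foldl_cons, pvStep]
    by_cases hc : c ∈ acc
    · simpa [hc] using ih acc
    · obtain ⟨u, hu, hnot⟩ := ih (acc ++ [c])
      refine ⟨c :: u, by rw [if_neg hc]; simpa using hu, ?_⟩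
      intro x hx
      rcases List.mem_cons.1 hx with rfl | hx
      · exact hc
      · have := hnot x hx; simp at this; exact this.1

theorem pvFold_mem (t : List Char) : ∀ acc : List Char, ∀ c ∈ t, c ∈ t.foldl pvStep acc := by
  induction t with
  | nil => simp
  | cons d t ih =>
    intro acc c hc
    simp only [List.foldl_cons]
    rcases List.mem_cons.1 hc with rfl | hc
    · obtain ⟨u, hu, _⟩ := pvFold_extend t (pvStep acc c)
      rw [hu]
      have : c ∈ pvStep acc c := by by_cases h : c ∈ acc <;> simp [pvStep, h]
      exact List.mem_append_left _ this
    · exact ih _ c hc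

theorem pvFold_const (t : List Char) (h : Char) (hall : ∀ c ∈ t, c = h) :
    t.foldl pvStep [h] = [h] := by
  induction t with
  | nil => rfl
  | cons c t ih =>
    have hc := hall c (by simp)
    subst hc
    simp only [List.foldl_cons, pvStep, List.mem_singleton]
    exact ih (fun c hc => hall c (by simp [hc]))

theorem pvFold_find? (p : Char → Bool) (t : List Char) : ∀ acc : List Char,
    (t.foldl pvStep acc).find? p = (acc.find? p).or (t.find? p) := by
  induction t with
  | nil => simp
  | cons c t ih =>
    intro acc
    simp only [List.foldl_cons, pvStep]
    by_cases hc : c ∈ acc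
    · rw [if_pos hc, ih acc, List.find?_cons]
      cases hp : p c
      · simp
      · cases hacc : acc.find? p
        · exact absurd (List.find?_eq_none.1 hacc c hc) (by simp [hp])
        · simp
    · rw [if_neg hc, ih (acc ++ [c]), List.find?_append, List.find?_cons]
      cases hp : p c <;> cases hacc : acc.find? p <;> simp [hp, Option.or]

theorem pvPickX_eq_find? (l : List Char) :
    pvPickX l = (l.find? (fun c => ('9' ≠ c : Bool))).getD '9' := by
  induction l with
  | nil => rfl
  | cons c rest ih =>
    rw [pvPickX, List.find?_cons]
    by_cases h : '9' = c
    · subst h; simpa using ih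
    · simp [h]

theorem pvWhile0_spec (ys : List Char) : ∀ i : Nat, i ≤ ys.length →
    (match (ys.drop i).find? (fun c => (c ≠ '0' : Bool)) with
     | some c => pvWhile0 ys i < ys.length ∧ ys[pvWhile0 ys i]? = some c
     | none => pvWhile0 ys i = ys.length) := by
  intro i
  induction hfu : ys.length - i generalizing i with
  | zero =>
    intro hle
    have hi : i = ys.length := by omega
    subst hi
    simp [pvWhile0, List.drop_length]
  | succ n ih =>
    intro hle
    have hlt : i < ys.length := by omega
    have hdrop : ys.drop i = ys[i] :: ys.drop (i + 1) := by
      rw [List.drop_eq_getElem_cons hlt]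
    rw [pvWhile0, dif_pos hlt, hdrop, List.find?_cons]
    by_cases h0 : ys[i] = '0'
    · rw [if_pos h0]
      simpa [h0] using ih (i+1) (by omega) (by omega)
    · simp [h0, hlt]

theorem pvFind?_congr {α : Type} (l : List α) (p q : α → Bool)
    (h : ∀ x ∈ l, p x = q x) : l.find? p = l.find? q := by
  induction l with
  | nil => rfl
  | cons x l ih =>
    rw [List.find?_cons, List.find?_cons, h x (by simp),
      ih (fun y hy => h y (by simp [hy]))]

theorem pvRep_eq (L : Nat) (hL : L ≤ 11) :
    (PySem.Int.ofChars? (List.replicate L '9')).getD 0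
      - (PySem.Int.ofChars? (List.replicate L '1')).getD 0
      = (PySem.Int.ofChars? (List.replicate L '8')).getD 0 := by
  interval_cases L <;> decide

theorem pvLen_toChars (num : Int) (h : -2147483648 ≤ num ∧ num ≤ 2147483648) :
    (PySem.Int.toChars num).length ≤ 11 := by
  have key : ∀ m : Nat, m ≤ 2147483648 → (Nat.toDigits 10 m).length ≤ 10 := by
    intro m hm
    exact Nat.toDigits_length 10 m 10 (by norm_num) (by omega)
  rw [PySem.Int.toChars]
  split
  · simp only [List.length_cons]
    have := key num.natAbs (by omega)
    omega
  · exact le_trans (key num.toNat (by omega)) (by omega)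

theorem pvMap_idx (s : List Char) (x c9 : Char) :
    (PySem.List.pyRange 0 (s.length : Int)).map
      (fun i => if PySem.List.pyGetD s i ' ' = x then c9 else PySem.List.pyGetD s i ' ')
      = s.map (fun ch => if ch = x then c9 else ch) := by
  have hc : (fun i => if PySem.List.pyGetD s i ' ' = x then c9 else PySem.List.pyGetD s i ' ')
      = (fun ch => if ch = x then c9 else ch) ∘ (fun i : Int => PySem.List.pyGetD s i ' ') := rfl
  rw [hc, ← List.map_map, PySem.List.map_pyGetD_pyRange_zero']

theorem pvOr_single (p : Char → Bool) (h : Char) (t : List Char) :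
    (([h].find? p).or (t.find? p)) = (h :: t).find? p := by
  cases hp : p h <;> simp [hp]

theorem pvGreedy_replicate (L : Nat) (d : Char) (hL : 0 < L) :
    pvGreedy (List.replicate L d)
      = (PySem.Int.ofChars? (List.replicate L '9')).getD 0
        - (PySem.Int.ofChars? (List.replicate L '1')).getD 0 := by
  obtain ⟨n, rfl⟩ : ∃ n, L = n + 1 := ⟨L - 1, by omega⟩
  simp only [pvGreedy, List.find?_replicate, List.replicate_succ,
    PySem.List.pyGetD_zero_cons, PySem.List.slice_from_one, List.tail_cons]
  by_cases h9 : d = '9'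
  · subst h9
    simp [← List.replicate_succ]
  · by_cases h1 : d = '1'
    · subst h1
      simp [← List.replicate_succ]
    · simp [h9, h1, ← List.replicate_succ]

theorem pvA_replicate (L : Nat) (d : Char) (hL : 0 < L) :
    pvA_core (List.replicate L d)
      = (PySem.Int.ofChars? (List.replicate L '8')).getD 0 := by
  obtain ⟨n, rfl⟩ : ∃ n, L = n + 1 := ⟨L - 1, by omega⟩
  have hfold : (List.replicate n d).foldl pvStep [d] = [d] :=
    pvFold_const _ d (fun c hc => (List.eq_of_mem_replicate hc))
  simp only [pvA_core, List.replicate_succ, PySem.List.pyGetD_zero_cons]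
  rw [PySem.List.foldl_pyRange_pyGetD' (d :: List.replicate n d) ' ' pvStep [d]
      (by norm_num : (0:Int) ≤ 1)]
  simp [hfold, ← List.replicate_succ]

theorem pvCore_eq (s : List Char) (hlen : s.length ≤ 11) : pvA_core s = pvGreedy s := by
  cases s with
  | nil => decide
  | cons h t =>
    by_cases hone : (t.foldl pvStep [h]).length = 1
    · -- C1: all characters of the string coincide; A takes its '8'*length shortcut
      have hall : ∀ c ∈ t, c = h := by
        intro c hc
        have hm := pvFold_mem t [h] c hc
        obtain ⟨u, huD, _⟩ := pvFold_extend t [h]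
        have hu0 : u = [] := by
          have hl := congrArg List.length huD
          simp at hl
          exact List.eq_nil_of_length_eq_zero (by omega)
        rw [huD, hu0] at hm; simpa using hm
      have hrep : h :: t = List.replicate (t.length + 1) h := by
        rw [List.eq_replicate_iff]
        refine ⟨by simp, ?_⟩
        intro b hb
        rcases List.mem_cons.1 hb with rfl | hb
        · rfl
        · exact hall b hb
      have hL11 : t.length + 1 ≤ 11 := by simpa using hlen
      rw [hrep, pvA_replicate _ h (by omega), pvGreedy_replicate _ h (by omega), pvRep_eq _ hL11]
    · -- C2: at least two distinct characters
      obtain ⟨u, huD, hnotin⟩ := pvFold_extend t [h]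
      rw [List.singleton_append] at huD
      simp only [List.mem_singleton] at hnotin
      simp only [pvA_core, pvGreedy, PySem.List.pyGetD_zero_cons,
        PySem.List.foldl_pyRange_pyGetD' (h :: t) ' ' pvStep [h] (by norm_num : (0:Int) ≤ 1),
        PySem.List.foldl_append_singleton_eq_map, List.nil_append,
        PySem.List.slice_from_one, List.tail_cons,
        show Int.toNat 1 = 1 from rfl, List.drop_one]
      rw [if_neg hone, huD]
      -- the chosen max digit is the first character ≠ '9'
      have hpp : (fun c : Char => decide ('9' ≠ c)) = (fun c : Char => decide (c ≠ '9')) := by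
        funext c; exact decide_eq_decide.mpr ne_comm
      have hfold9 := pvFold_find? (fun c : Char => decide ('9' ≠ c)) t [h]
      rw [huD, pvOr_single] at hfold9
      have hx9 : pvPickX (h :: u) = ((h :: t).find? (fun c : Char => decide (c ≠ '9'))).getD '9' := by
        rw [pvPickX_eq_find?, hfold9, hpp]
      rcases hfind : (h :: t).find? (fun c : Char => decide (c ≠ '9')) with _ | c0
      · -- impossible: then every character is '9', so the distinct list had length 1
        exfalso
        have h9 : ∀ c ∈ (h :: t), c = '9' := by
          intro c hc
          have := List.find?_eq_none.1 hfind c hc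
          simpa using this
        exact hone (by
          rw [pvFold_const t h (fun c hc => (h9 c (by simp [hc])).trans (h9 h (by simp)).symm)]
          rfl)
      · have hx : pvPickX (h :: u) = c0 := by rw [hx9, hfind]; rfl
        rw [hx, pvMap_idx (h :: t) c0 '9']
        -- the min side
        by_cases hh : h = '1'
        · subst hh
          rw [if_neg (show ¬(PySem.List.pyGetD ('1' :: u) 0 ' ' ≠ '1') by simp),
            if_neg (show ¬(('1' : Char) ≠ '1') by simp)]
          have hq := pvFold_find? (fun ch : Char => !(ch == '0' || ch == '1')) t ['1']
          rw [huD, pvOr_single] at hq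
          have hqt : u.find? (fun ch : Char => !(ch == '0' || ch == '1'))
              = t.find? (fun ch : Char => !(ch == '0' || ch == '1')) := by
            rw [List.find?_cons, List.find?_cons] at hq
            simpa using hq
          have hcong : u.find? (fun c : Char => decide (c ≠ '0'))
              = u.find? (fun ch : Char => !(ch == '0' || ch == '1')) := by
            refine pvFind?_congr u _ _ ?_
            intro x hx
            have h1 : x ≠ '1' := hnotin x hx
            have h1' : (x == '1') = false := by simpa using h1
            by_cases hx0 : x = '0' <;> simp [hx0, h1']
          have hspec := pvWhile0_spec ('1' :: u) 1 (by simp)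
          rw [List.drop_one, List.tail_cons] at hspec
          rcases hu : u.find? (fun c : Char => decide (c ≠ '0')) with _ | c1
          · -- every later distinct character is '0' or '1': the minimum is num itself
            rw [hu] at hspec
            simp only at hspec
            rw [if_pos hspec]
            have hune : u ≠ [] := by
              rw [huD] at hone
              intro hnil; rw [hnil] at hone; exact hone rfl
            obtain ⟨u0, u', rfl⟩ : ∃ u0 u', u = u0 :: u' := by
              cases u with
              | nil => exact absurd rfl hune
              | cons a b => exact ⟨a, b, rfl⟩
            have hu0 : u0 = '0' := by
              have := List.find?_eq_none.1 hu u0 (by simp)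
              simpa using this
            subst hu0
            have hy : PySem.List.pyGetD ('1' :: '0' :: u') 1 ' ' = '0' := by
              rw [show (1 : Int) = ((1 : Nat) : Int) from rfl, PySem.List.pyGetD_natCast]
              rfl
            rw [hy,
              show (('0', '0') : Char × Char).1 = '0' from rfl,
              show (('0', '0') : Char × Char).2 = '0' from rfl,
              pvMap_idx ('1' :: t) '0' '0']
            have hB : t.find? (fun ch : Char => !(ch == '0' || ch == '1')) = none := by
              rw [← hqt, ← hcong, hu]
            rw [hB]
            have hid : (('1' :: t).map (fun ch => if ch = '0' then '0' else ch)) = '1' :: t := by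
              rw [List.map_congr_left (g := id) (fun a ha => by by_cases h0 : a = '0' <;> simp [h0]),
                List.map_id]
            rw [hid]
          · -- the first later character outside {'0','1'} is set to '0'
            rw [hu] at hspec
            simp only at hspec
            obtain ⟨hlt, hget⟩ := hspec
            rw [if_neg (by omega)]
            have hy : PySem.List.pyGetD ('1' :: u) (↑(pvWhile0 ('1' :: u) 1)) ' ' = c1 := by
              rw [PySem.List.pyGetD_natCast, List.getD_eq_getElem?_getD, hget]
              rfl
            rw [hy,
              show ((c1, '0') : Char × Char).1 = c1 from rfl,
              show ((c1, '0') : Char × Char).2 = '0' from rfl,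
              pvMap_idx ('1' :: t) c1 '0']
            have hB : t.find? (fun ch : Char => !(ch == '0' || ch == '1')) = some c1 := by
              rw [← hqt, ← hcong, hu]
            rw [hB]
        · -- first digit ≠ '1': it is set to '1' on both sides
          rw [PySem.List.pyGetD_zero_cons, if_pos hh, if_pos hh,
            show ((h, '1') : Char × Char).1 = h from rfl,
            show ((h, '1') : Char × Char).2 = '1' from rfl,
            pvMap_idx (h :: t) h '1']

-- ==== the brute-force side: characterising max/min of the candidate set ====

-- the digit-character range as arithmetic on code points
def pvDig (c : Char) : Prop := 48 ≤ c.toNat ∧ c.toNat ≤ 57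

theorem pvCharLt {a b : Char} : a < b ↔ a.toNat < b.toNat := by
  rw [Char.lt_def]; exact UInt32.lt_iff_toNat_lt

theorem pvCharLe {a b : Char} : a ≤ b ↔ a.toNat ≤ b.toNat := by
  rw [Char.le_def]; exact UInt32.le_iff_toNat_le

theorem pvCharEq {a b : Char} : a = b ↔ a.toNat = b.toNat := by
  constructor
  · rintro rfl; rfl
  · intro h; apply Char.ext; exact UInt32.toNat_inj.mp h

-- greedy maximum and minimum as plain functions of the character list
def pvHi (s : List Char) : List Char :=
  match s.find? (fun ch => ch ≠ '9') with
  | some c => pvSubst s c '9'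
  | none => s

def pvMlo (u : List Char) : List Char :=
  match u.find? (fun ch => !(ch == '0' || ch == '1')) with
  | some c1 => pvSubst u c1 '0'
  | none => u

def pvLo : List Char → List Char
  | [] => []
  | x :: s' =>
    if x ≠ '1' then pvSubst (x :: s') x '1'
    else
      match s'.find? (fun ch => !(ch == '0' || ch == '1')) with
      | some c1 => pvSubst (x :: s') c1 '0'
      | none => x :: s'

theorem pvSubst_cons (x : Char) (s : List Char) (c d : Char) :
    pvSubst (x :: s) c d = (if x = c then d else x) :: pvSubst s c d := rfl

theorem pvSubst_self (s : List Char) (c : Char) : pvSubst s c c = s := by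
  simp only [pvSubst]
  rw [List.map_congr_left (g := id) (fun a ha => by by_cases h : a = c <;> simp [h])]
  exact List.map_id _

theorem pvMaxCongr (i1 i2 : DecidableLT (List Char)) (l : List (List Char)) :
    @PySem.List.max? _ _ _ i1 l (fun t => t) = @PySem.List.max? _ _ _ i2 l (fun t => t) := by
  rw [Subsingleton.elim i1 i2]

theorem pvMinCongr (i1 i2 : DecidableLT (List Char)) (l : List (List Char)) :
    @PySem.List.min? _ _ _ i1 l (fun t => t) = @PySem.List.min? _ _ _ i2 l (fun t => t) := by
  rw [Subsingleton.elim i1 i2]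

theorem pvMaxEq (l : List (List Char)) (h : List Char) (hmem : h ∈ l)
    (hub : ∀ t ∈ l, t ≤ h) : PySem.List.max? l (fun t => t) = some h := by
  cases hmax : PySem.List.max? l (fun t => t) with
  | none => rw [PySem.List.max?_eq_none_iff] at hmax; subst hmax; cases hmem
  | some m =>
    have h2 := PySem.List.max?_mem hmax
    rw [pvMaxCongr _ (@LinearOrder.toDecidableLT (List Char) inferInstance)] at hmax
    have h1 := @PySem.List.max?_isMax (List Char) (List Char) inferInstance l (fun t => t) m hmax h hmem
    exact congrArg some (le_antisymm (hub m h2) h1)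

theorem pvMinEq (l : List (List Char)) (h : List Char) (hmem : h ∈ l)
    (hlb : ∀ t ∈ l, h ≤ t) : PySem.List.min? l (fun t => t) = some h := by
  cases hmin : PySem.List.min? l (fun t => t) with
  | none => rw [PySem.List.min?_eq_none_iff] at hmin; subst hmin; cases hmem
  | some m =>
    have h2 := PySem.List.min?_mem hmin
    rw [pvMinCongr _ (@LinearOrder.toDecidableLT (List Char) inferInstance)] at hmin
    have h1 := @PySem.List.min?_isMin (List Char) (List Char) inferInstance l (fun t => t) m hmin h hmem
    exact congrArg some (le_antisymm h1 (hlb m h2))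

theorem pvConsLe {a : Char} {u v : List Char} (h : u ≤ v) : a :: u ≤ a :: v := by
  rcases lt_or_eq_of_le h with h | h
  · exact le_of_lt (List.cons_lt_cons_self.mpr h)
  · subst h; exact le_refl _

theorem pvHeadLe {a b : Char} {u v : List Char} (hab : a < b) : a :: u ≤ b :: v :=
  le_of_lt (List.cons_lt_cons_iff.mpr (Or.inl hab))

theorem pvMem_digits {d : Char} : d ∈ pvDigitsList ↔ pvDig d := by
  constructor
  · intro h; fin_cases h <;> simp [pvDig]
  · rintro ⟨h1, h2⟩
    have : d.toNat = 48 ∨ d.toNat = 49 ∨ d.toNat = 50 ∨ d.toNat = 51 ∨ d.toNat = 52 ∨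
        d.toNat = 53 ∨ d.toNat = 54 ∨ d.toNat = 55 ∨ d.toNat = 56 ∨ d.toNat = 57 := by omega
    rcases this with h | h | h | h | h | h | h | h | h | h <;>
      rw [← Char.ofNat_toNat d, h] <;> decide

theorem pvIsdigit_iff {c : Char} : PySem.Chars.isdigit c = true ↔ pvDig c := by
  simp only [PySem.Chars.isdigit, Bool.and_eq_true, decide_eq_true_eq, pvDig,
    pvCharLe]
  constructor <;> (rintro ⟨h1, h2⟩; exact ⟨h1, h2⟩)

theorem pvMem_pvCands {s t : List Char} :
    t ∈ pvCands s ↔ ∃ c ∈ s, ∃ d ∈ pvDigitsList,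
      pvCandTest (pvSubst s c d) = true ∧ t = pvSubst s c d := by
  constructor
  · intro h
    obtain ⟨c, hc, h2⟩ := List.mem_flatMap.mp h
    obtain ⟨d, hd, h3⟩ := List.mem_flatMap.mp h2
    obtain ⟨t', ht', h4⟩ := List.mem_flatMap.mp h3
    rw [List.mem_singleton] at ht'
    subst ht'
    by_cases hcond : pvCandTest (pvSubst s c d) = true
    · rw [if_pos hcond, List.mem_singleton] at h4
      exact ⟨c, hc, d, hd, hcond, h4⟩
    · rw [if_neg hcond] at h4; cases h4
  · rintro ⟨c, hc, d, hd, hcond, rfl⟩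
    refine List.mem_flatMap.mpr ⟨c, hc, List.mem_flatMap.mpr ⟨d, hd,
      List.mem_flatMap.mpr ⟨pvSubst s c d, List.mem_singleton.mpr rfl, ?_⟩⟩⟩
    rw [if_pos hcond, List.mem_singleton]

-- ==== max side ====

theorem pvHi_nine_cons (s : List Char) : pvHi ('9' :: s) = '9' :: pvHi s := by
  rw [pvHi, pvHi, List.find?_cons_of_neg (by decide)]
  cases h : s.find? (fun ch => decide (ch ≠ '9')) with
  | none => rfl
  | some c =>
    show pvSubst ('9' :: s) c '9' = '9' :: pvSubst s c '9'
    rw [pvSubst_cons, ite_self]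

theorem pvSubst_le_pvHi (s : List Char) (hs : ∀ x ∈ s, x ≤ '9') (c d : Char) (hd : d ≤ '9') :
    pvSubst s c d ≤ pvHi s := by
  induction s with
  | nil => exact le_refl _
  | cons x s' ih =>
    by_cases hx9 : x = '9'
    · subst hx9
      rw [pvHi_nine_cons, pvSubst_cons]
      by_cases hc : ('9' : Char) = c
      · by_cases hd9 : d = '9'
        · subst hd9
          rw [if_pos hc]
          exact pvConsLe (ih (fun y hy => hs y (by simp [hy])))
        · rw [if_pos hc]
          exact pvHeadLe (lt_of_le_of_ne hd hd9)
      · rw [if_neg hc]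
        exact pvConsLe (ih (fun y hy => hs y (by simp [hy])))
    · have hfind : (x :: s').find? (fun ch => decide (ch ≠ '9')) = some x :=
        List.find?_cons_of_pos (by simp [hx9])
      rw [show pvHi (x :: s') = pvSubst (x :: s') x '9' by rw [pvHi, hfind]]
      rw [pvSubst_cons, pvSubst_cons, if_pos rfl]
      by_cases hc : x = c
      · by_cases hd9 : d = '9'
        · subst hd9; subst hc
          rw [if_pos rfl]
        · rw [if_pos hc]
          exact pvHeadLe (lt_of_le_of_ne hd hd9)
      · rw [if_neg hc]
        exact pvHeadLe (lt_of_le_of_ne (hs x (by simp)) hx9)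

-- ==== min side ====

theorem pvMlo_cons01 (y : Char) (u : List Char) (h : (y == '0' || y == '1') = true) :
    pvMlo (y :: u) = y :: pvMlo u := by
  rw [pvMlo, pvMlo, List.find?_cons_of_neg (by simp [h])]
  cases hf : u.find? (fun ch => !(ch == '0' || ch == '1')) with
  | none => rfl
  | some c1 =>
    have hc1 := List.find?_some hf
    have hy : y ≠ c1 := by
      intro hyc; rw [← hyc] at hc1; rw [h] at hc1; cases hc1
    show pvSubst (y :: u) c1 '0' = y :: pvSubst u c1 '0'
    rw [pvSubst_cons, if_neg hy]

theorem pvMlo_cons_big (y : Char) (u : List Char) (h : (y == '0' || y == '1') = false) :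
    pvMlo (y :: u) = '0' :: pvSubst u y '0' := by
  rw [pvMlo, List.find?_cons_of_pos (by simp [h])]
  show pvSubst (y :: u) y '0' = '0' :: pvSubst u y '0'
  rw [pvSubst_cons, if_pos rfl]

theorem pvMlo_le_self (u : List Char) (hu : ∀ y ∈ u, pvDig y) : pvMlo u ≤ u := by
  induction u with
  | nil => exact le_refl _
  | cons y u' ih =>
    by_cases h01 : (y == '0' || y == '1') = true
    · rw [pvMlo_cons01 y u' h01]
      exact pvConsLe (ih (fun z hz => hu z (by simp [hz])))
    · rw [pvMlo_cons_big y u' (by simpa using h01)]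
      refine pvHeadLe ?_
      have hy := hu y (by simp)
      have hy0 : y ≠ '0' := by
        intro h; rw [h] at h01; simp at h01
      rw [pvCharLt]
      have : y.toNat ≠ 48 := fun h => hy0 (pvCharEq.mpr (by simpa using h))
      have e0 : ('0' : Char).toNat = 48 := rfl
      simp only [pvDig] at hy
      omega

theorem pvMlo_le_subst (u : List Char) (hu : ∀ y ∈ u, pvDig y) (c d : Char)
    (hc : c ≠ '1') (hd : pvDig d) : pvMlo u ≤ pvSubst u c d := by
  induction u with
  | nil => exact le_refl _
  | cons y u' ih =>
    have hu' : ∀ z ∈ u', pvDig z := fun z hz => hu z (by simp [hz])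
    rw [pvSubst_cons]
    by_cases h01 : (y == '0' || y == '1') = true
    · rw [pvMlo_cons01 y u' h01]
      by_cases hyc : y = c
      · -- y = c forces y = '0' (y ∈ {'0','1'} and c ≠ '1')
        have hy0 : y = '0' := by
          rcases Bool.or_eq_true_iff.mp h01 with h | h
          · exact beq_iff_eq.mp h
          · exact absurd (hyc ▸ beq_iff_eq.mp h) hc
        rw [if_pos hyc]
        by_cases hd0 : d = '0'
        · subst hd0; rw [hy0]
          exact pvConsLe (ih hu')
        · refine pvHeadLe ?_
          rw [hy0, pvCharLt]
          have : d.toNat ≠ 48 := fun h => hd0 (pvCharEq.mpr (by simpa using h))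
          have e0 : ('0' : Char).toNat = 48 := rfl
          simp only [pvDig] at hd
          omega
      · rw [if_neg hyc]
        exact pvConsLe (ih hu')
    · have h01' : (y == '0' || y == '1') = false := by simpa using h01
      rw [pvMlo_cons_big y u' h01']
      by_cases hyc : y = c
      · by_cases hd0 : d = '0'
        · subst hd0
          rw [if_pos hyc, ← hyc]
        · rw [if_pos hyc]
          refine pvHeadLe ?_
          rw [pvCharLt]
          have : d.toNat ≠ 48 := fun h => hd0 (pvCharEq.mpr (by simpa using h))
          have e0 : ('0' : Char).toNat = 48 := rfl
          simp only [pvDig] at hd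
          omega
      · rw [if_neg hyc]
        refine pvHeadLe ?_
        have hy0 : y ≠ '0' := by intro h; rw [h] at h01'; simp at h01'
        have hy := hu y (by simp)
        rw [pvCharLt]
        have : y.toNat ≠ 48 := fun h => hy0 (pvCharEq.mpr (by simpa using h))
        have e0 : ('0' : Char).toNat = 48 := rfl
        simp only [pvDig] at hy
        omega

theorem pvLo_le_subst (x : Char) (s' : List Char) (hs' : ∀ y ∈ s', pvDig y) (c d : Char)
    (hd : pvDig d)
    (hdig : PySem.Chars.strIsdigit (pvSubst (x :: s') c d) = true)
    (h0 : (if x = c then d else x) ≠ '0') :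
    pvLo (x :: s') ≤ pvSubst (x :: s') c d := by
  have hhead : pvDig (if x = c then d else x) := by
    simp only [PySem.Chars.strIsdigit, pvSubst_cons, Bool.and_eq_true, List.all_cons] at hdig
    exact pvIsdigit_iff.mp hdig.2.1
  rw [pvSubst_cons]
  by_cases hx1 : x = '1'
  · subst hx1
    rw [show pvLo ('1' :: s') = '1' :: pvMlo s' by
      rw [pvLo, if_neg (by simp)]
      cases hf : s'.find? (fun ch => !(ch == '0' || ch == '1')) with
      | none => rw [pvMlo, hf]
      | some c1 =>
        have hc1 := List.find?_some hf
        have h1c : ('1' : Char) ≠ c1 := by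
          intro h; rw [← h] at hc1; simp at hc1
        show pvSubst ('1' :: s') c1 '0' = '1' :: pvMlo s'
        rw [pvSubst_cons, if_neg h1c, pvMlo, hf]]
    by_cases hc1 : ('1' : Char) = c
    · rw [if_pos hc1]
      by_cases hd1 : d = '1'
      · subst hd1
        rw [← hc1, pvSubst_self]
        exact pvConsLe (pvMlo_le_self s' hs')
      · refine pvHeadLe ?_
        have hd0 : d ≠ '0' := by
          rw [if_pos hc1] at h0; exact h0
        rw [pvCharLt]
        have h1 : d.toNat ≠ 48 := fun h => hd0 (pvCharEq.mpr (by simpa using h))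
        have h2 : d.toNat ≠ 49 := fun h => hd1 (pvCharEq.mpr (by simpa using h))
        have e1 : ('1' : Char).toNat = 49 := rfl
        simp only [pvDig] at hd
        omega
    · rw [if_neg hc1]
      exact pvConsLe (pvMlo_le_subst s' hs' c d (fun h => hc1 h.symm) hd)
  · rw [show pvLo (x :: s') = (if x = x then '1' else x) :: pvSubst s' x '1' by
      rw [pvLo, if_pos hx1, pvSubst_cons]]
    rw [if_pos rfl]
    set hx : Char := if x = c then d else x with hhx
    by_cases hxeq : hx = '1'
    · -- head stays '1' only via x = c, d = '1'
      by_cases hxc : x = c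
      · have hd1 : d = '1' := by rw [hhx, if_pos hxc] at hxeq; exact hxeq
        rw [show hx = '1' from hxeq, hd1, ← hxc]
      · exfalso; rw [hhx, if_neg hxc] at hxeq; exact hx1 hxeq
    · refine pvHeadLe ?_
      rw [pvCharLt]
      have h1 : hx.toNat ≠ 48 := fun h => h0 (pvCharEq.mpr (by simpa using h))
      have h2 : hx.toNat ≠ 49 := fun h => hxeq (pvCharEq.mpr (by simpa using h))
      have e1 : ('1' : Char).toNat = 49 := rfl
      simp only [pvDig] at hhead
      omega

-- ==== memberships ====

theorem pvSubst_digits (s : List Char) (c d : Char) (hd : pvDig d)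
    (hs : ∀ y ∈ s, y ≠ c → pvDig y) :
    (pvSubst s c d).all PySem.Chars.isdigit = true := by
  rw [List.all_eq_true]
  intro z hz
  obtain ⟨y, hy, rfl⟩ := List.mem_map.mp hz
  by_cases hyc : y = c
  · rw [if_pos hyc]; exact pvIsdigit_iff.mpr hd
  · rw [if_neg hyc]; exact pvIsdigit_iff.mpr (hs y hy hyc)

theorem pvCands_cond (s : List Char) (c d : Char) (hd : pvDig d)
    (hs : ∀ y ∈ s, y ≠ c → pvDig y) (hne : s ≠ [])
    (hhead : PySem.List.pyGetD (pvSubst s c d) 0 ' ' ≠ '0') :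
    pvCandTest (pvSubst s c d) = true := by
  rw [pvCandTest, Bool.and_eq_true]
  constructor
  · rw [PySem.Chars.strIsdigit, Bool.and_eq_true]
    refine ⟨?_, pvSubst_digits s c d hd hs⟩
    simp only [Bool.not_eq_eq_eq_not, Bool.not_true, List.isEmpty_eq_false_iff]
    simp only [pvSubst, ne_eq, List.map_eq_nil_iff]
    exact hne
  · simpa using hhead

def pvShape (x : Char) (s' : List Char) : Prop :=
  (∀ y ∈ s', pvDig y) ∧ (x = '-' ∨ pvDig x) ∧ (x = '0' → s' = [])

theorem pvHi_mem (x : Char) (s' : List Char) (hsh : pvShape x s') :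
    pvHi (x :: s') ∈ pvCands (x :: s') := by
  obtain ⟨hs', hx, hx0⟩ := hsh
  rw [pvMem_pvCands]
  cases hfind : (x :: s').find? (fun ch => decide (ch ≠ '9')) with
  | none =>
    -- every character is '9'
    have h9 : ∀ y ∈ (x :: s'), y = '9' := by
      intro y hy
      have := List.find?_eq_none.1 hfind y hy
      simpa using this
    have hx9 : x = '9' := h9 x (by simp)
    refine ⟨'9', by rw [← hx9]; simp, '9', by decide, ?_, ?_⟩
    · refine pvCands_cond (x :: s') '9' '9' (by simp [pvDig]) (fun y hy _ => by rw [h9 y hy]; simp [pvDig])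
        (by simp) ?_
      rw [pvSubst_self, PySem.List.pyGetD_zero_cons, hx9]
      decide
    · rw [pvHi, hfind, pvSubst_self]
  | some c0 =>
    have hc0mem : c0 ∈ x :: s' := List.mem_of_find?_eq_some hfind
    have hc0 : c0 ≠ '9' := by simpa using List.find?_some hfind
    have hxdig : x ≠ c0 → pvDig x := by
      intro hxc
      rcases hx with hm | hd
      · exfalso
        have : (x :: s').find? (fun ch => decide (ch ≠ '9')) = some x :=
          List.find?_cons_of_pos (by rw [hm]; decide)
        rw [this] at hfind
        exact hxc (Option.some_inj.mp hfind)
      · exact hd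
    refine ⟨c0, hc0mem, '9', by decide, ?_, ?_⟩
    · refine pvCands_cond (x :: s') c0 '9' (by simp [pvDig])
        (fun y hy hyc => ?_) (by simp) ?_
      · rcases List.mem_cons.1 hy with rfl | hy'
        · exact hxdig hyc
        · exact hs' y hy'
      · rw [pvSubst_cons, PySem.List.pyGetD_zero_cons]
        by_cases hxc : x = c0
        · rw [if_pos hxc]; decide
        · rw [if_neg hxc]
          intro hx0'
          have : s' = [] := hx0 hx0'
          subst this
          -- then s = ['0'] and the found char must be x itself
          rw [hx0', List.find?_cons_of_pos (by decide)] at hfind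
          exact hxc (hx0'.trans (Option.some_inj.mp hfind))
    · rw [pvHi, hfind]

theorem pvLo_mem (x : Char) (s' : List Char) (hsh : pvShape x s') :
    pvLo (x :: s') ∈ pvCands (x :: s') := by
  obtain ⟨hs', hx, hx0⟩ := hsh
  rw [pvMem_pvCands]
  by_cases hx1 : x = '1'
  · subst hx1
    cases hf : s'.find? (fun ch => !(ch == '0' || ch == '1')) with
    | none =>
      refine ⟨'1', by simp, '1', by decide, ?_, ?_⟩
      · exact pvCands_cond ('1' :: s') '1' '1' (by simp [pvDig])
          (fun y hy hyc => by
            rcases List.mem_cons.1 hy with rfl | hy'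
            · simp [pvDig]
            · exact hs' y hy') (by simp)
          (by rw [pvSubst_self, PySem.List.pyGetD_zero_cons]; decide)
      · rw [pvLo, if_neg (by simp), hf, pvSubst_self]
    | some c1 =>
      have hc1mem : c1 ∈ '1' :: s' := List.mem_cons_of_mem _ (List.mem_of_find?_eq_some hf)
      have hc1p := List.find?_some hf
      have hc11 : ('1' : Char) ≠ c1 := by
        intro h; rw [← h] at hc1p; simp at hc1p
      refine ⟨c1, hc1mem, '0', by decide, ?_, ?_⟩
      · refine pvCands_cond ('1' :: s') c1 '0' (by simp [pvDig])
          (fun y hy hyc => ?_) (by simp) ?_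
        · rcases List.mem_cons.1 hy with rfl | hy'
          · simp [pvDig]
          · exact hs' y hy'
        · rw [pvSubst_cons, PySem.List.pyGetD_zero_cons, if_neg hc11]
          decide
      · rw [pvLo, if_neg (by simp), hf]
  · refine ⟨x, by simp, '1', by decide, ?_, ?_⟩
    · refine pvCands_cond (x :: s') x '1' (by simp [pvDig])
        (fun y hy hyc => ?_) (by simp) ?_
      · rcases List.mem_cons.1 hy with rfl | hy'
        · exact absurd rfl hyc
        · exact hs' y hy'
      · rw [pvSubst_cons, PySem.List.pyGetD_zero_cons, if_pos rfl]
        decide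
    · rw [pvLo, if_pos hx1]

-- ==== assembling both extremes ====

theorem pvMax_cands (x : Char) (s' : List Char) (hsh : pvShape x s') :
    PySem.List.max? (pvCands (x :: s')) (fun t => t) = some (pvHi (x :: s')) := by
  refine pvMaxEq _ _ (pvHi_mem x s' hsh) ?_
  intro t ht
  rw [pvMem_pvCands] at ht
  obtain ⟨c, hc, d, hd, hcond, rfl⟩ := ht
  have hd' := pvMem_digits.mp hd
  refine pvSubst_le_pvHi (x :: s') ?_ c d (by rw [pvCharLe]; exact hd'.2)
  intro y hy
  rcases List.mem_cons.1 hy with rfl | hy'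
  · rcases hsh.2.1 with hm | hdg
    · rw [hm, pvCharLe]; decide
    · rw [pvCharLe]; exact hdg.2
  · rw [pvCharLe]; exact (hsh.1 y hy').2

theorem pvMin_cands (x : Char) (s' : List Char) (hsh : pvShape x s') :
    PySem.List.min? (pvCands (x :: s')) (fun t => t) = some (pvLo (x :: s')) := by
  refine pvMinEq _ _ (pvLo_mem x s' hsh) ?_
  intro t ht
  rw [pvMem_pvCands] at ht
  obtain ⟨c, hc, d, hd, hcond, rfl⟩ := ht
  rw [pvCandTest, Bool.and_eq_true] at hcond
  refine pvLo_le_subst x s' hsh.1 c d (pvMem_digits.mp hd) hcond.1 ?_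
  have := hcond.2
  rw [pvSubst_cons, PySem.List.pyGetD_zero_cons] at this
  simpa using this

theorem pvGreedy_cons (x : Char) (s' : List Char) :
    pvGreedy (x :: s')
      = (PySem.Int.ofChars? (pvHi (x :: s'))).getD 0
        - (PySem.Int.ofChars? (pvLo (x :: s'))).getD 0 := by
  rw [pvGreedy, pvHi, pvLo]
  simp only [PySem.List.pyGetD_zero_cons, PySem.List.slice_from_one, List.tail_cons]
  rfl

-- ==== the shape of str(num) ====

theorem pvToDigits_digits (n : Nat) : ∀ c ∈ Nat.toDigits 10 n, pvDig c := by
  intro c hc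
  have h := Nat.isDigit_of_mem_toDigits (by norm_num) (le_refl 10) hc
  simp only [Char.isDigit, Bool.and_eq_true, decide_eq_true_eq, ge_iff_le] at h
  constructor
  · have := UInt32.le_iff_toNat_le.mp h.1; simpa using this
  · have := UInt32.le_iff_toNat_le.mp h.2; simpa using this

theorem pvToDigits_head (n : Nat) (hn : 0 < n) :
    ∀ hd t, Nat.toDigits 10 n = hd :: t → hd ≠ '0' := by
  induction n using Nat.strong_induction_on with
  | _ n ih =>
    intro hd t heq
    rcases lt_or_ge n 10 with h10 | h10
    · rw [Nat.toDigits_of_lt_base h10] at heq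
      have : hd = n.digitChar := by
        have := (List.cons.injEq _ _ _ _).mp heq.symm
        exact this.1
      rw [this]
      interval_cases n <;> simp_all <;> decide
    · rw [Nat.toDigits_of_base_le (by norm_num) h10] at heq
      obtain ⟨hd', t', heq'⟩ : ∃ hd' t', Nat.toDigits 10 (n / 10) = hd' :: t' := by
        cases h : Nat.toDigits 10 (n / 10) with
        | nil => exact absurd (congrArg List.length h) (by simpa using (Nat.length_toDigits_pos (b := 10) (n := n / 10)).ne')
        | cons a b => exact ⟨a, b, rfl⟩
      rw [heq'] at heq
      have : hd = hd' := ((List.cons.injEq _ _ _ _).mp heq).1.symm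
      rw [this]
      exact ih (n / 10) (by omega) (by omega) hd' t' heq'

theorem pvShape_toChars (num : Int) :
    ∃ x s', PySem.Int.toChars num = x :: s' ∧ pvShape x s' := by
  rw [PySem.Int.toChars]
  split
  · refine ⟨'-', Nat.toDigits 10 num.natAbs, rfl, pvToDigits_digits _, Or.inl rfl, ?_⟩
    intro h; cases h
  · set n := num.toNat with hn
    obtain ⟨x, s', heq⟩ : ∃ x s', Nat.toDigits 10 n = x :: s' := by
      cases h : Nat.toDigits 10 n with
      | nil => exact absurd (congrArg List.length h) (by simpa using (Nat.length_toDigits_pos (b := 10) (n := n)).ne')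
      | cons a b => exact ⟨a, b, rfl⟩
    refine ⟨x, s', heq, ?_, ?_, ?_⟩
    · intro y hy; exact pvToDigits_digits n y (by rw [heq]; exact List.mem_cons_of_mem _ hy)
    · exact Or.inr (pvToDigits_digits n x (by rw [heq]; simp))
    · intro hx0
      by_cases hn0 : 0 < n
      · exact absurd hx0 (pvToDigits_head n hn0 x s' heq)
      · have : n = 0 := by omega
        rw [this, Nat.toDigits_zero] at heq
        exact (List.cons.injEq _ _ _ _).mp heq |>.2.symm

-- ===== VERDICT (by name: the statement is the Claim_ definition above) =====
theorem maxDiff_20250615_spec : Claim_equal_maxDiff_20250615 := by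
  intro num hdom
  unfold Spec_maxDiff_20250615 maxDiff_20250615 maxDiff_20250615_alt
  obtain ⟨x, s', heq, hsh⟩ := pvShape_toChars num
  rw [pvCore_eq _ (pvLen_toChars num (by
    simpa [Dom_maxDiff_20250615, pvDomInt] using hdom))]
  simp only [heq]
  rw [pvMax_cands x s' hsh, pvMin_cands x s' hsh, pvGreedy_cons]
  rfl
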